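-- pv_equiv track=rewrite | github.com/T-R0D/JustForFun | adventofcode/Day11/corporate_policy.py | contains_straight
-- ===== SOURCE A (Python) =====
-- def contains_straight(password):
-- 	if len(password) >= 3:
--
-- 		for c in range(2, len(password)):
-- 			i = password[c - 2]
-- 			j = password[c - 1]
-- 			k = password[c]
--
-- 			if (ord(i) == (ord(j) - 1)) and (ord(j) == (ord(k) - 1)):
-- 				return True
--
-- 	return False
-- ===== SOURCE B (Python) =====
-- def contains_straight(password):
--     run = 1
--     for prev, cur in zip(password, password[1:]):
--         run = run + 1 if ord(cur) == ord(prev) + 1 else 1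
--         if run >= 3:
--             return True
--     return False
-- ===== Notes on version B (the rewrite author's own statement) =====
-- stated objective: simpler
-- what changed: Replaces the triple-indexing loop over range(2, len) with a single pass over adjacent pairs that maintains an ascending-run counter and fires when the run reaches 3.
import Mathlib
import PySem

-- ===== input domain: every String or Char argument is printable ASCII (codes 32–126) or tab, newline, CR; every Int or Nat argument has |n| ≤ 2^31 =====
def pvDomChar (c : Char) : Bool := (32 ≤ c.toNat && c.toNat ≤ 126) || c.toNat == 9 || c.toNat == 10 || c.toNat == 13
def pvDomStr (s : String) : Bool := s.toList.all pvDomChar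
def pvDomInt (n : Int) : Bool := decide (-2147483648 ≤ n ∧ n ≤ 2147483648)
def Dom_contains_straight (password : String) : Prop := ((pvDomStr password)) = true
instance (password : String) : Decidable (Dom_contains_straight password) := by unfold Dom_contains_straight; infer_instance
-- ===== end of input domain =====

-- B replaces A's triple-indexing loop over range(2, len) by a single adjacent-pair pass
-- maintaining an ascending-run counter (objective: simpler).

-- ===== PORT A =====
-- the 'for c in range(2, len(password))' loop with early return True
def csLoopA (l : List Char) : List Int → Bool
  | [] => false
  | c :: cs =>
    match PySem.List.pyGet? l (c - 2), PySem.List.pyGet? l (c - 1), PySem.List.pyGet? l c with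
    | some i, some j, some k =>
        if (i.toNat : Int) = (j.toNat : Int) - 1 ∧ (j.toNat : Int) = (k.toNat : Int) - 1
        then true
        else csLoopA l cs
    | _, _, _ => false   -- unreachable: c is in range

def contains_straight (password : String) : Bool :=
  if (3 : Int) ≤ PySem.Str.len password then
    csLoopA password.toList (PySem.List.pyRange 2 (PySem.Str.len password) 1)
  else false

-- ===== PORT B =====
-- the 'for prev, cur in zip(password, password[1:])' loop carrying the run counter
def csLoopB (prev : Char) (run : Int) : List Char → Bool
  | [] => false
  | cur :: rest =>
      let run' : Int := if (cur.toNat : Int) = (prev.toNat : Int) + 1 then run + 1 else 1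
      if 3 ≤ run' then true else csLoopB cur run' rest

def contains_straight_alt (password : String) : Bool :=
  match password.toList with
  | [] => false
  | p :: rest => csLoopB p 1 rest

-- ===== PRECONDITION & SPEC =====
def Spec_contains_straight (password : String) (out : Bool) : Prop := out = contains_straight_alt password
instance (password : String) (out : Bool) : Decidable (Spec_contains_straight password out) := by unfold Spec_contains_straight; infer_instance

-- ===== CLAIM (what is proved, stated in full; the proofs are below) =====
def Claim_equal_contains_straight : Prop := ∀ (password : String), Dom_contains_straight password → Spec_contains_straight password (contains_straight password)

-- ===== LEMMAS AND PROOFS =====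

-- reference predicate: some window of three consecutive ascending characters
def straight : List Char → Bool
  | a :: b :: c :: rest =>
      if (a.toNat : Int) = (b.toNat : Int) - 1 ∧ (b.toNat : Int) = (c.toNat : Int) - 1
      then true
      else straight (b :: c :: rest)
  | _ => false

lemma straight_short (l : List Char) (h : l.length ≤ 2) : straight l = false := by
  match l with
  | [] => rfl
  | [_] => rfl
  | [_, _] => rfl
  | _ :: _ :: _ :: _ => simp at h

lemma csLoopB_runs (rest : List Char) : ∀ prev : Char,
    csLoopB prev 1 rest = straight (prev :: rest) ∧
    csLoopB prev 2 rest =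
      ((match rest with
        | [] => false
        | c :: _ => decide ((prev.toNat : Int) = (c.toNat : Int) - 1)) || straight (prev :: rest)) := by
  induction rest with
  | nil => intro prev; refine ⟨rfl, ?_⟩; simp [csLoopB, straight]
  | cons c r ih =>
      intro prev
      constructor
      · by_cases h : (c.toNat : Int) = (prev.toNat : Int) + 1
        · have h' : (prev.toNat : Int) = (c.toNat : Int) - 1 := by omega
          have e : csLoopB prev 1 (c :: r) = csLoopB c 2 r := by
            simp only [csLoopB]; rw [if_pos h]; norm_num
          rw [e, (ih c).2]
          match r with
          | [] => simp [straight, h']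
          | d :: r' => simp [straight, h']
        · have h' : ¬ (prev.toNat : Int) = (c.toNat : Int) - 1 := by omega
          have e : csLoopB prev 1 (c :: r) = csLoopB c 1 r := by
            simp only [csLoopB]; rw [if_neg h]; norm_num
          rw [e, (ih c).1]
          match r with
          | [] => simp [straight]
          | d :: r' => simp [straight, h']
      · by_cases h : (c.toNat : Int) = (prev.toNat : Int) + 1
        · have h' : (prev.toNat : Int) = (c.toNat : Int) - 1 := by omega
          have e : csLoopB prev 2 (c :: r) = true := by
            simp only [csLoopB]; rw [if_pos h]; norm_num
          rw [e]; simp [h']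
        · have h' : ¬ (prev.toNat : Int) = (c.toNat : Int) - 1 := by omega
          have e : csLoopB prev 2 (c :: r) = csLoopB c 1 r := by
            simp only [csLoopB]; rw [if_neg h]; norm_num
          rw [e, (ih c).1]
          match r with
          | [] => simp [straight, h']
          | d :: r' => simp [straight, h']

lemma alt_eq_straight (password : String) :
    contains_straight_alt password = straight password.toList := by
  unfold contains_straight_alt
  match h : password.toList with
  | [] => simp [straight]
  | p :: rest => exact (csLoopB_runs rest p).1

lemma csLoopA_eq_straight : ∀ (m : ℕ) (l : List Char) (c : ℕ), 2 ≤ c → l.length ≤ c + m →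
    csLoopA l (PySem.List.pyRange (c : Int) (l.length : Int) 1) = straight (l.drop (c - 2)) := by
  intro m
  induction m with
  | zero =>
      intro l c hc hl
      rw [PySem.List.pyRange_one_eq_nil (by exact_mod_cast hl)]
      rw [straight_short _ (by simp; omega)]
      rfl
  | succ m ih =>
      intro l c hc hl
      by_cases hend : l.length ≤ c
      · rw [PySem.List.pyRange_one_eq_nil (by exact_mod_cast hend)]
        rw [straight_short _ (by simp; omega)]
        rfl
      · push Not at hend
        rw [PySem.List.pyRange_one_cons (by exact_mod_cast hend)]
        have e1 : ((c : Int) - 2) = ((c - 2 : ℕ) : Int) := by omega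
        have e2 : ((c : Int) - 1) = ((c - 1 : ℕ) : Int) := by omega
        have e3 : ((c : Int) + 1) = ((c + 1 : ℕ) : Int) := by omega
        have h2 : c - 2 < l.length := by omega
        have h1 : c - 1 < l.length := by omega
        have h0 : c < l.length := hend
        have d2 : l.drop (c - 2) = l[c - 2] :: l[c - 1] :: l[c] :: l.drop (c + 1) := by
          rw [List.drop_eq_getElem_cons h2, List.drop_eq_getElem_cons (by omega : c - 2 + 1 < l.length),
              List.drop_eq_getElem_cons (by omega : c - 2 + 1 + 1 < l.length)]
          congr 2
          · congr 1; omega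
          · congr 2
            · congr 1; omega
            · omega
        unfold csLoopA
        rw [e1, e2, e3, PySem.List.pyGet?_natCast, PySem.List.pyGet?_natCast, PySem.List.pyGet?_natCast]
        rw [List.getElem?_eq_getElem h2, List.getElem?_eq_getElem h1, List.getElem?_eq_getElem h0]
        simp only [d2, straight]
        split_ifs with hcond
        · rfl
        · have ihr := ih l (c + 1) (by omega) (by omega)
          rw [ihr]
          have e4 : c + 1 - 2 = c - 1 := by omega
          rw [e4, List.drop_eq_getElem_cons h1]
          have e5 : c - 1 + 1 = c := by omega
          rw [e5, List.drop_eq_getElem_cons h0]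

lemma a_eq_straight (password : String) :
    contains_straight password = straight password.toList := by
  unfold contains_straight
  rw [PySem.Str.len_eq]
  split_ifs with h
  · have := csLoopA_eq_straight password.toList.length password.toList 2 (le_refl _) (by omega)
    simpa using this
  · rw [straight_short _ (by exact_mod_cast by omega : password.toList.length ≤ 2)]

-- ===== VERDICT (by name: the statement is the Claim_ definition above) =====
theorem contains_straight_spec : Claim_equal_contains_straight := by
  intro password _
  unfold Spec_contains_straight
  rw [a_eq_straight, alt_eq_straight]
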